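-- pv_equiv track=rewrite | github.com/CamChatHel/PBAnalyse | B_backend/transform/pruef_1_gen.py | build_date_regex
-- ===== SOURCE A (Python) =====
-- def build_date_regex(date_patterns):
--     regex_parts = []
--     for pattern in date_patterns:
--         regex_pattern = pattern.replace('%d', r'\d{1,2}') \
--                                .replace('%m', r'\d{1,2}') \
--                                .replace('%Y', r'\d{4}') \
--                                .replace('%y', r'\d{2}') \
--                                .replace('%B', r'[A-Za-zäöüÄÖÜß]+\.?') \
--                                .replace('%b', r'[A-Za-zäöüÄÖÜß]+\.?')
--         regex_parts.append(regex_pattern)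
--     return r"(" + r"|".join(regex_parts) + r")"
-- ===== SOURCE B (Python) =====
-- TOKENS = {'d': r'\d{1,2}', 'm': r'\d{1,2}', 'Y': r'\d{4}', 'y': r'\d{2}',
--           'B': r'[A-Za-zäöüÄÖÜß]+\.?', 'b': r'[A-Za-zäöüÄÖÜß]+\.?'}
--
-- def _sub_tokens(pattern):
--     out = []
--     i = 0
--     n = len(pattern)
--     while i < n:
--         if pattern[i] == '%' and i + 1 < n and pattern[i + 1] in TOKENS:
--             out.append(TOKENS[pattern[i + 1]])
--             i += 2
--         else:
--             out.append(pattern[i])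
--             i += 1
--     return ''.join(out)
--
-- def build_date_regex(date_patterns):
--     return "(" + "|".join(_sub_tokens(p) for p in date_patterns) + ")"
-- ===== Notes on version B (the rewrite author's own statement) =====
-- stated objective: alternative
-- what changed: Replaces A's six chained full-string .replace passes per pattern by a single left-to-right scan that looks each '%x' token up in a token dict, relying on the fact that no replacement fragment contains '%'.
import Mathlib
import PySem

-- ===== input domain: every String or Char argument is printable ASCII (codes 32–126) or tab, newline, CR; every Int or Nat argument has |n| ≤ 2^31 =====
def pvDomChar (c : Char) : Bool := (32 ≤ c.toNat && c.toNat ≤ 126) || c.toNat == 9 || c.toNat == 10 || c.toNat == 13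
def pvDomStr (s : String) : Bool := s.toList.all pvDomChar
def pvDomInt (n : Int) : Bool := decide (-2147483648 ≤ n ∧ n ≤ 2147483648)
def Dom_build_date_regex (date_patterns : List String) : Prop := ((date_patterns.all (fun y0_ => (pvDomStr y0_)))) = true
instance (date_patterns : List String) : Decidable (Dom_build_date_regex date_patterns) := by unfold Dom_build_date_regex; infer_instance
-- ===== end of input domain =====

-- B replaces A's six chained full-string .replace passes by one left-to-right pass with a token table (objective: alternative).

-- ===== PORT A =====
def build_date_regex (date_patterns : List String) : String :=
  let regex_parts := date_patterns.foldl (fun regex_parts pattern =>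
    let regex_pattern :=
      PySem.Str.replace (PySem.Str.replace (PySem.Str.replace (PySem.Str.replace
        (PySem.Str.replace (PySem.Str.replace pattern "%d" "\\d{1,2}")
          "%m" "\\d{1,2}") "%Y" "\\d{4}") "%y" "\\d{2}")
        "%B" "[A-Za-zäöüÄÖÜß]+\\.?") "%b" "[A-Za-zäöüÄÖÜß]+\\.?"
    regex_parts ++ [regex_pattern]) []
  "(" ++ PySem.Str.join "|" regex_parts ++ ")"

-- ===== PORT B =====
-- the TOKENS dict of Source B (dict → association list; keys are the single chars after '%')
def pvTOKENS : List (Char × List Char) :=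
  [('d', "\\d{1,2}".toList), ('m', "\\d{1,2}".toList), ('Y', "\\d{4}".toList),
   ('y', "\\d{2}".toList), ('B', "[A-Za-zäöüÄÖÜß]+\\.?".toList), ('b', "[A-Za-zäöüÄÖÜß]+\\.?".toList)]

-- the while-loop of _sub_tokens: consume one char, or a '%'+token pair of chars, per step
def pvScan : List Char → List Char
  | [] => []
  | [c] => [c]
  | c1 :: c2 :: t =>
    if c1 = '%' then
      match pvTOKENS.lookup c2 with
      | some f => f ++ pvScan t
      | none => c1 :: pvScan (c2 :: t)
    else c1 :: pvScan (c2 :: t)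

def build_date_regex_alt (date_patterns : List String) : String :=
  "(" ++ PySem.Str.join "|" (date_patterns.map (fun p => String.ofList (pvScan p.toList))) ++ ")"

-- ===== PRECONDITION & SPEC =====
def Spec_build_date_regex (date_patterns : List String) (out : String) : Prop := out = build_date_regex_alt date_patterns
instance (date_patterns : List String) (out : String) : Decidable (Spec_build_date_regex date_patterns out) := by unfold Spec_build_date_regex; infer_instance

-- ===== CLAIM (what is proved, stated in full; the proofs are below) =====
def Claim_equal_build_date_regex : Prop := ∀ (date_patterns : List String), Dom_build_date_regex date_patterns → Spec_build_date_regex date_patterns (build_date_regex date_patterns)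

-- ===== LEMMAS AND PROOFS =====

-- Python's s.replace('%x', new) as a plain structural recursion (every pattern of A is two chars '%x')
def repl2 (x : Char) (new : List Char) : List Char → List Char
  | [] => []
  | [c] => [c]
  | c1 :: c2 :: t => if c1 = '%' ∧ c2 = x then new ++ repl2 x new t else c1 :: repl2 x new (c2 :: t)

theorem repl2_cons_ne (x : Char) (new : List Char) (c : Char) (cs : List Char) (h : c ≠ '%') :
    repl2 x new (c :: cs) = c :: repl2 x new cs := by
  cases cs with
  | nil => simp [repl2]
  | cons c2 t => simp [repl2, h]

theorem repl2_pct (x : Char) (new : List Char) (cs : List Char)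
    (h : ∀ c2, cs.head? = some c2 → c2 ≠ x) :
    repl2 x new ('%' :: cs) = '%' :: repl2 x new cs := by
  cases cs with
  | nil => simp [repl2]
  | cons c2 t => simp [repl2, h c2 rfl]

theorem repl2_match (x : Char) (new : List Char) (t : List Char) :
    repl2 x new ('%' :: x :: t) = new ++ repl2 x new t := by
  simp [repl2]

theorem repl2_nopct_append (x : Char) (new u v : List Char) (h : '%' ∉ u) :
    repl2 x new (u ++ v) = u ++ repl2 x new v := by
  induction u with
  | nil => rfl
  | cons c u' ih =>
    have hc : c ≠ '%' := by intro hc; exact h (hc ▸ List.mem_cons_self)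
    have hu' : '%' ∉ u' := fun hm => h (List.mem_cons_of_mem _ hm)
    simp only [List.cons_append, repl2_cons_ne x new c (u' ++ v) hc, ih hu']

-- go-lemma: PySem's fueled replace loop computes repl2 when old = ['%', x]
theorem replace_go_eq (x : Char) (new : List Char) :
    ∀ (fuel : Nat) (l acc : List Char), l.length ≤ fuel →
      PySem.Chars.replace.go ['%', x] new fuel l acc = acc.reverse ++ repl2 x new l := by
  intro fuel
  induction fuel with
  | zero =>
    intro l acc hl
    have : l = [] := List.eq_nil_of_length_eq_zero (Nat.le_zero.mp hl)
    subst this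
    simp [PySem.Chars.replace.go, repl2]
  | succ fuel ih =>
    intro l acc hl
    cases l with
    | nil => simp [PySem.Chars.replace.go, repl2]
    | cons c t =>
      cases t with
      | nil =>
        have hpre : List.isPrefixOf ['%', x] [c] = false := by
          simp [List.isPrefixOf]
        simp only [PySem.Chars.replace.go, hpre]
        rw [ih [] (c :: acc) (by simp)]
        simp [repl2]
      | cons c2 t' =>
        by_cases hm : c = '%' ∧ c2 = x
        · obtain ⟨h1, h2⟩ := hm
          subst h1; subst h2
          have hpre : List.isPrefixOf ['%', c2] ('%' :: c2 :: t') = true := by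
            simp [List.isPrefixOf]
          simp only [PySem.Chars.replace.go, hpre, if_true, List.length_cons, List.length_nil,
            List.drop_succ_cons, List.drop_zero]
          rw [ih t' (new.reverse ++ acc) (by simp at hl ⊢; omega)]
          simp [repl2_match]
        · have hpre : List.isPrefixOf ['%', x] (c :: c2 :: t') = false := by
            rcases not_and_or.mp hm with h | h
            · have hb : ('%' == c) = false := beq_eq_false_iff_ne.mpr (fun hh => h hh.symm)
              simp [List.isPrefixOf, hb]
            · have hb : (x == c2) = false := beq_eq_false_iff_ne.mpr (fun hh => h hh.symm)
              simp [List.isPrefixOf, hb]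
          simp only [PySem.Chars.replace.go, hpre]
          rw [ih (c2 :: t') (c :: acc) (by simp at hl ⊢; omega)]
          have hstep : repl2 x new (c :: c2 :: t') = c :: repl2 x new (c2 :: t') := by
            simp [repl2, hm]
          simp [hstep]

theorem replace_two (x : Char) (new s : List Char) :
    PySem.Chars.replace s ['%', x] new = repl2 x new s := by
  have h := replace_go_eq x new s.length s [] (le_refl _)
  simpa [PySem.Chars.replace] using h

-- token characters, and the "head is not a token char" invariant
def pvToks : List Char := ['d', 'm', 'Y', 'y', 'B', 'b']

def HeadOk (w : List Char) : Prop := ∀ h, w.head? = some h → h ∉ pvToks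

theorem headOk_repl2 (x : Char) (new w : List Char) (hne : new ≠ [])
    (hnew : ∀ h, new.head? = some h → h ∉ pvToks) (hw : HeadOk w) :
    HeadOk (repl2 x new w) := by
  cases w with
  | nil => intro h hh; simp [repl2] at hh
  | cons c1 t =>
    cases t with
    | nil =>
      intro h hh
      simp [repl2] at hh
      exact hh ▸ hw c1 rfl
    | cons c2 t' =>
      intro h hh
      by_cases hm : c1 = '%' ∧ c2 = x
      · rw [repl2, if_pos hm] at hh
        cases new with
        | nil => exact absurd rfl hne
        | cons n0 ns =>
          simp at hh
          exact hh ▸ hnew n0 rfl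
      · rw [repl2, if_neg hm] at hh
        simp at hh
        exact hh ▸ hw c1 rfl

theorem repl2_pct_headOk (x : Char) (new w : List Char) (hx : x ∈ pvToks) (hw : HeadOk w) :
    repl2 x new ('%' :: w) = '%' :: repl2 x new w :=
  repl2_pct x new w (fun c2 hc2 => fun he => (hw c2 hc2) (he ▸ hx))

-- the six chained replaces of A, on the list side
def pvChain (cs : List Char) : List Char :=
  repl2 'b' "[A-Za-zäöüÄÖÜß]+\\.?".toList
    (repl2 'B' "[A-Za-zäöüÄÖÜß]+\\.?".toList
      (repl2 'y' "\\d{2}".toList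
        (repl2 'Y' "\\d{4}".toList
          (repl2 'm' "\\d{1,2}".toList
            (repl2 'd' "\\d{1,2}".toList cs)))))

theorem chain_eq_scan : ∀ cs : List Char, pvChain cs = pvScan cs := by
  intro cs
  induction cs using pvScan.induct with
  | case1 => rfl
  | case2 c => rfl
  | case3 c2 t f hf ih =>
    have hscan : pvScan ('%' :: c2 :: t) = f ++ pvScan t := by
      rw [pvScan]; simp [hf]
    rw [hscan, ← ih]
    have h6 : c2 = 'd' ∨ c2 = 'm' ∨ c2 = 'Y' ∨ c2 = 'y' ∨ c2 = 'B' ∨ c2 = 'b' := by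
      by_contra hc; push Not at hc
      obtain ⟨a, b, c, d, e, g⟩ := hc
      simp [pvTOKENS, List.lookup, beq_eq_false_iff_ne.mpr a, beq_eq_false_iff_ne.mpr b,
        beq_eq_false_iff_ne.mpr c, beq_eq_false_iff_ne.mpr d, beq_eq_false_iff_ne.mpr e,
        beq_eq_false_iff_ne.mpr g] at hf
    unfold pvChain
    rcases h6 with h | h | h | h | h | h <;> subst h <;>
      simp only [pvTOKENS, List.lookup] at hf <;> simp at hf <;> subst hf
    · rw [repl2_match 'd']
      rw [repl2_nopct_append 'm' _ "\\d{1,2}".toList _ (by decide),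
          repl2_nopct_append 'Y' _ "\\d{1,2}".toList _ (by decide),
          repl2_nopct_append 'y' _ "\\d{1,2}".toList _ (by decide),
          repl2_nopct_append 'B' _ "\\d{1,2}".toList _ (by decide),
          repl2_nopct_append 'b' _ "\\d{1,2}".toList _ (by decide)]
      congr 1
    · rw [repl2_pct 'd' _ _ (by intro a ha; simp at ha; subst ha; decide),
          repl2_cons_ne 'd' _ _ _ (by decide), repl2_match 'm']
      rw [repl2_nopct_append 'Y' _ "\\d{1,2}".toList _ (by decide),
          repl2_nopct_append 'y' _ "\\d{1,2}".toList _ (by decide),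
          repl2_nopct_append 'B' _ "\\d{1,2}".toList _ (by decide),
          repl2_nopct_append 'b' _ "\\d{1,2}".toList _ (by decide)]
      congr 1
    · rw [repl2_pct 'd' _ _ (by intro a ha; simp at ha; subst ha; decide),
          repl2_cons_ne 'd' _ _ _ (by decide),
          repl2_pct 'm' _ _ (by intro a ha; simp at ha; subst ha; decide),
          repl2_cons_ne 'm' _ _ _ (by decide), repl2_match 'Y']
      rw [repl2_nopct_append 'y' _ "\\d{4}".toList _ (by decide),
          repl2_nopct_append 'B' _ "\\d{4}".toList _ (by decide),
          repl2_nopct_append 'b' _ "\\d{4}".toList _ (by decide)]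
      congr 1
    · rw [repl2_pct 'd' _ _ (by intro a ha; simp at ha; subst ha; decide),
          repl2_cons_ne 'd' _ _ _ (by decide),
          repl2_pct 'm' _ _ (by intro a ha; simp at ha; subst ha; decide),
          repl2_cons_ne 'm' _ _ _ (by decide),
          repl2_pct 'Y' _ _ (by intro a ha; simp at ha; subst ha; decide),
          repl2_cons_ne 'Y' _ _ _ (by decide), repl2_match 'y']
      rw [repl2_nopct_append 'B' _ "\\d{2}".toList _ (by decide),
          repl2_nopct_append 'b' _ "\\d{2}".toList _ (by decide)]
      congr 1
    · rw [repl2_pct 'd' _ _ (by intro a ha; simp at ha; subst ha; decide),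
          repl2_cons_ne 'd' _ _ _ (by decide),
          repl2_pct 'm' _ _ (by intro a ha; simp at ha; subst ha; decide),
          repl2_cons_ne 'm' _ _ _ (by decide),
          repl2_pct 'Y' _ _ (by intro a ha; simp at ha; subst ha; decide),
          repl2_cons_ne 'Y' _ _ _ (by decide),
          repl2_pct 'y' _ _ (by intro a ha; simp at ha; subst ha; decide),
          repl2_cons_ne 'y' _ _ _ (by decide), repl2_match 'B']
      rw [repl2_nopct_append 'b' _ "[A-Za-zäöüÄÖÜß]+\\.?".toList _ (by decide)]
      congr 1
    · rw [repl2_pct 'd' _ _ (by intro a ha; simp at ha; subst ha; decide),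
          repl2_cons_ne 'd' _ _ _ (by decide),
          repl2_pct 'm' _ _ (by intro a ha; simp at ha; subst ha; decide),
          repl2_cons_ne 'm' _ _ _ (by decide),
          repl2_pct 'Y' _ _ (by intro a ha; simp at ha; subst ha; decide),
          repl2_cons_ne 'Y' _ _ _ (by decide),
          repl2_pct 'y' _ _ (by intro a ha; simp at ha; subst ha; decide),
          repl2_cons_ne 'y' _ _ _ (by decide),
          repl2_pct 'B' _ _ (by intro a ha; simp at ha; subst ha; decide),
          repl2_cons_ne 'B' _ _ _ (by decide), repl2_match 'b']
      congr 1
  | case4 c2 t hf ih =>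
    have hc2 : c2 ∉ pvToks := by
      intro hm
      simp [pvToks] at hm
      rcases hm with h | h | h | h | h | h <;> subst h <;> simp [pvTOKENS, List.lookup] at hf
    have hscan : pvScan ('%' :: c2 :: t) = '%' :: pvScan (c2 :: t) := by
      rw [pvScan]; simp [hf]
    rw [hscan, ← ih]
    have h0 : HeadOk (c2 :: t) := by intro h hh; simp at hh; exact hh ▸ hc2
    have hFd : ∀ h, ("\\d{1,2}".toList).head? = some h → h ∉ pvToks := by
      intro h hh; rw [show "\\d{1,2}".toList = '\\' :: "d{1,2}".toList from by decide] at hh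
      simp at hh; subst hh; decide
    have hFY : ∀ h, ("\\d{4}".toList).head? = some h → h ∉ pvToks := by
      intro h hh; rw [show "\\d{4}".toList = '\\' :: "d{4}".toList from by decide] at hh
      simp at hh; subst hh; decide
    have hFy : ∀ h, ("\\d{2}".toList).head? = some h → h ∉ pvToks := by
      intro h hh; rw [show "\\d{2}".toList = '\\' :: "d{2}".toList from by decide] at hh
      simp at hh; subst hh; decide
    have hFB : ∀ h, ("[A-Za-zäöüÄÖÜß]+\\.?".toList).head? = some h → h ∉ pvToks := by
      intro h hh; rw [show "[A-Za-zäöüÄÖÜß]+\\.?".toList = '[' :: "A-Za-zäöüÄÖÜß]+\\.?".toList from by decide] at hh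
      simp at hh; subst hh; decide
    have h1 := headOk_repl2 'd' _ _ (by decide) hFd h0
    have h2 := headOk_repl2 'm' _ _ (by decide) hFd h1
    have h3 := headOk_repl2 'Y' _ _ (by decide) hFY h2
    have h4 := headOk_repl2 'y' _ _ (by decide) hFy h3
    have h5 := headOk_repl2 'B' _ _ (by decide) hFB h4
    unfold pvChain
    rw [repl2_pct_headOk 'd' _ _ (by decide) h0,
        repl2_pct_headOk 'm' _ _ (by decide) h1,
        repl2_pct_headOk 'Y' _ _ (by decide) h2,
        repl2_pct_headOk 'y' _ _ (by decide) h3,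
        repl2_pct_headOk 'B' _ _ (by decide) h4,
        repl2_pct_headOk 'b' _ _ (by decide) h5]
  | case5 c1 c2 t h1 ih =>
    unfold pvChain
    rw [repl2_cons_ne 'd' _ _ _ h1, repl2_cons_ne 'm' _ _ _ h1, repl2_cons_ne 'Y' _ _ _ h1,
        repl2_cons_ne 'y' _ _ _ h1, repl2_cons_ne 'B' _ _ _ h1, repl2_cons_ne 'b' _ _ _ h1]
    rw [show pvScan (c1 :: c2 :: t) = c1 :: pvScan (c2 :: t) from by rw [pvScan, if_neg h1]]
    rw [← pvChain, ih]

theorem per_pattern (p : String) :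
    PySem.Str.replace (PySem.Str.replace (PySem.Str.replace (PySem.Str.replace
        (PySem.Str.replace (PySem.Str.replace p "%d" "\\d{1,2}")
          "%m" "\\d{1,2}") "%Y" "\\d{4}") "%y" "\\d{2}")
        "%B" "[A-Za-zäöüÄÖÜß]+\\.?") "%b" "[A-Za-zäöüÄÖÜß]+\\.?"
      = String.ofList (pvScan p.toList) := by
  have h1 : (PySem.Str.replace (PySem.Str.replace (PySem.Str.replace (PySem.Str.replace
        (PySem.Str.replace (PySem.Str.replace p "%d" "\\d{1,2}")
          "%m" "\\d{1,2}") "%Y" "\\d{4}") "%y" "\\d{2}")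
        "%B" "[A-Za-zäöüÄÖÜß]+\\.?") "%b" "[A-Za-zäöüÄÖÜß]+\\.?").toList = pvChain p.toList := by
    simp only [PySem.Str.toList_replace]
    rw [show ("%d").toList = ['%', 'd'] from by decide,
        show ("%m").toList = ['%', 'm'] from by decide,
        show ("%Y").toList = ['%', 'Y'] from by decide,
        show ("%y").toList = ['%', 'y'] from by decide,
        show ("%B").toList = ['%', 'B'] from by decide,
        show ("%b").toList = ['%', 'b'] from by decide]
    simp only [replace_two]
    rfl
  calc _ = String.ofList (PySem.Str.replace (PySem.Str.replace (PySem.Str.replace (PySem.Str.replace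
            (PySem.Str.replace (PySem.Str.replace p "%d" "\\d{1,2}")
              "%m" "\\d{1,2}") "%Y" "\\d{4}") "%y" "\\d{2}")
            "%B" "[A-Za-zäöüÄÖÜß]+\\.?") "%b" "[A-Za-zäöüÄÖÜß]+\\.?").toList := String.ofList_toList.symm
    _ = String.ofList (pvChain p.toList) := by rw [h1]
    _ = String.ofList (pvScan p.toList) := by rw [chain_eq_scan]

-- ===== VERDICT (by name: the statement is the Claim_ definition above) =====
theorem build_date_regex_spec : Claim_equal_build_date_regex := by
  intro dp _
  unfold Spec_build_date_regex build_date_regex build_date_regex_alt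
  simp only []
  rw [PySem.List.foldl_append_singleton_eq_map]
  simp only [List.nil_append, per_pattern]
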